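-- pv_equiv track=rewrite | github.com/halirutan/IJGradleDependencyGraph | task_analysis.py | parse_task_tree_output
-- ===== SOURCE A (Python) =====
-- from typing import List
--
-- def parse_task_tree_output(task_name: str, output: str) -> List[tuple[str, int]]:
--     """
--     Takes the raw string output of the taskTree run and extracts the actual dependency-tree portion from it.
--     :param task_name: The name of the task that was used.
--     :param output: The output string from `run_gradle_task_tree`.
--     :return: A list of tuples representing the task name and its respective level in the task tree.
--     """
--     lines = output.split("\n")
--     dependencies = []
--     state = 0
--     whitespace_per_level = None
--     for line in lines:
--         if state == 0 and line.startswith(task_name):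
--             dependencies.append((task_name, 0))
--             state = 1
--         elif state == 1:
--             if line == "":
--                 break
--             index = line.index(":")
--             if whitespace_per_level is None:
--                 whitespace_per_level = index
--             dependencies.append((line[index:], index // whitespace_per_level))
--     return dependencies
-- ===== SOURCE B (Python) =====
-- def parse_task_tree_output(task_name: str, output: str):
--     lines = output.split("\n")
--     start = next((i for i, ln in enumerate(lines) if ln.startswith(task_name)), -1)
--     if start == -1:
--         return []
--     tail = lines[start + 1:]
--     body = tail[:tail.index("")] if "" in tail else tail
--     if not body:
--         return [(task_name, 0)]
--     wpl = body[0].index(":")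
--     return [(task_name, 0)] + [(ln[ln.index(":"):], ln.index(":") // wpl) for ln in body]
-- ===== Notes on version B (the rewrite author's own statement) =====
-- stated objective: simpler
-- what changed: A's single three-state loop with threaded state/whitespace_per_level is replaced by a find-start index, a slice up to the first empty line, and one map over that body window.
import Mathlib
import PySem

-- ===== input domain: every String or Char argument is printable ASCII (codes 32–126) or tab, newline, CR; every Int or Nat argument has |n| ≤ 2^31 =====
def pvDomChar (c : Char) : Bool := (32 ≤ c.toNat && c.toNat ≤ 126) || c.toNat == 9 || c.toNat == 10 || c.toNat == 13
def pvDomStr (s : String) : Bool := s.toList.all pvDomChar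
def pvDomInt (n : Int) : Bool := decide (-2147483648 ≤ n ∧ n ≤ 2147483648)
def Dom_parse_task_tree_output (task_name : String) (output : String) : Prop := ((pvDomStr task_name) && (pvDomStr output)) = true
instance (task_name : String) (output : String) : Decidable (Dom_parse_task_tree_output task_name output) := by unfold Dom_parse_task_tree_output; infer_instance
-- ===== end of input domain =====

-- B replaces A's single three-state loop by a find-start / slice-window / map decomposition (objective: simpler); same return values, same raise set.

-- ===== PORT A =====
-- the state machine of A: state 0 = searching for the task line, state 1 = collecting the tree body
def pvALoop (task_name : String) : List String → Nat → Option Int → List (String × Int) → List (String × Int)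
  | [], _, _, deps => deps
  | line :: rest, state, wpl, deps =>
    if state = 0 ∧ PySem.Str.startswith line task_name then
      pvALoop task_name rest 1 wpl (deps ++ [(task_name, 0)])
    else if state = 1 then
      if line = "" then deps  -- break
      else
        let index := PySem.Str.find line ":"   -- line.index(":"); Pre_ excludes the -1 (ValueError) case
        let wpl' := wpl.getD index
        pvALoop task_name rest 1 (some wpl')
          (deps ++ [(PySem.Str.slice line (some index) none, PySem.Int.floordiv index wpl')])
    else
      pvALoop task_name rest state wpl deps

def parse_task_tree_output (task_name : String) (output : String) : List (String × Int) :=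
  pvALoop task_name ((PySem.Str.split? output "\n").getD []) 0 none []   -- sep "\n" ≠ "", so split? is some

-- ===== PORT B =====
def parse_task_tree_output_alt (task_name : String) (output : String) : List (String × Int) :=
  let lines := (PySem.Str.split? output "\n").getD []   -- sep "\n" ≠ "", so split? is some
  match lines.findIdx? (fun ln => PySem.Str.startswith ln task_name) with
  | none => []
  | some start =>
    let tail := PySem.List.slice lines (some ((start : Int) + 1)) none   -- lines[start+1:]
    let body := match PySem.List.index? tail "" with                     -- tail[:tail.index("")] if "" in tail else tail
      | some k => tail.take k
      | none => tail
    match body with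
    | [] => [(task_name, 0)]
    | b0 :: _ =>
      let wpl := PySem.Str.find b0 ":"
      (task_name, 0) :: body.map (fun ln =>
        let idx := PySem.Str.find ln ":"
        (PySem.Str.slice ln (some idx) none, PySem.Int.floordiv idx wpl))

-- ===== PRECONDITION & SPEC =====
-- Pre_ excludes exactly the inputs where A raises: a body line without ':' (ValueError from line.index)
-- or a first body line whose ':' is at index 0 (ZeroDivisionError from index // whitespace_per_level).
def pvPreCheck (task_name : String) (output : String) : Bool :=
  let lines := (PySem.Str.split? output "\n").getD []
  match lines.findIdx? (fun ln => PySem.Str.startswith ln task_name) with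
  | none => true
  | some start =>
    let body := (lines.drop (start + 1)).takeWhile (fun ln => !(ln == ""))
    body.all (fun ln => PySem.Str.find ln ":" != -1) &&
      (match body with
       | [] => true
       | b0 :: _ => PySem.Str.find b0 ":" != 0)

def Pre_parse_task_tree_output (task_name : String) (output : String) : Prop :=
  pvPreCheck task_name output = true
instance (task_name : String) (output : String) : Decidable (Pre_parse_task_tree_output task_name output) := by
  unfold Pre_parse_task_tree_output; infer_instance

def pvWitness_parse_task_tree_output : String × String := ("a", "a\n :x\n  :y\n\nz")

def Spec_parse_task_tree_output (task_name : String) (output : String) (out : List (String × Int)) : Prop := out = parse_task_tree_output_alt task_name output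
instance (task_name : String) (output : String) (out : List (String × Int)) : Decidable (Spec_parse_task_tree_output task_name output out) := by unfold Spec_parse_task_tree_output; infer_instance

-- ===== CLAIM (what is proved, stated in full; the proofs are below) =====
def Claim_equal_parse_task_tree_output : Prop := ∀ (task_name : String) (output : String), Dom_parse_task_tree_output task_name output → Pre_parse_task_tree_output task_name output → Spec_parse_task_tree_output task_name output (parse_task_tree_output task_name output)

-- ===== LEMMAS AND PROOFS =====

-- the per-line mapping of B's comprehension
def pvLineEntry (wpl : Int) (ln : String) : String × Int :=
  (PySem.Str.slice ln (some (PySem.Str.find ln ":")) none,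
   PySem.Int.floordiv (PySem.Str.find ln ":") wpl)

-- phase 0 of A: scanning for the first line that starts with task_name
theorem pvALoop_state0 (t : String) (lines : List String) (deps : List (String × Int)) :
    pvALoop t lines 0 none deps =
      match lines.findIdx? (fun ln => PySem.Str.startswith ln t) with
      | none => deps
      | some i => pvALoop t (lines.drop (i + 1)) 1 none (deps ++ [(t, 0)]) := by
  induction lines generalizing deps with
  | nil => simp [pvALoop]
  | cons line rest ih =>
    by_cases h : PySem.Chars.startswith line.toList t.toList = true
    · simp [pvALoop, h, List.findIdx?_cons]
    · rw [show pvALoop t (line :: rest) 0 none deps = pvALoop t rest 0 none deps by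
        simp [pvALoop, h]]
      rw [ih]
      rw [List.findIdx?_cons]
      cases hx : rest.findIdx? (fun ln => PySem.Str.startswith ln t) <;> simp [h, hx]

-- phase 1 of A with whitespace_per_level already fixed
theorem pvALoop_state1_some (t : String) (rest : List String) (w : Int)
    (deps : List (String × Int)) :
    pvALoop t rest 1 (some w) deps =
      deps ++ (rest.takeWhile (fun ln => !(ln == ""))).map (pvLineEntry w) := by
  induction rest generalizing deps with
  | nil => simp [pvALoop]
  | cons line rest ih =>
    by_cases h : line = ""
    · simp [pvALoop, h]
    · rw [show pvALoop t (line :: rest) 1 (some w) deps =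
          pvALoop t rest 1 (some w) (deps ++ [pvLineEntry w line]) by
        simp [pvALoop, h, pvLineEntry]]
      rw [ih]
      simp [h]

-- phase 1 of A with whitespace_per_level still None: the first body line fixes it
theorem pvALoop_state1_none (t : String) (tail : List String) (deps : List (String × Int)) :
    pvALoop t tail 1 none deps =
      deps ++ (match tail.takeWhile (fun ln => !(ln == "")) with
        | [] => []
        | b0 :: _ =>
          (tail.takeWhile (fun ln => !(ln == ""))).map (pvLineEntry (PySem.Str.find b0 ":"))) := by
  cases tail with
  | nil => simp [pvALoop]
  | cons line rest =>
    by_cases h : line = ""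
    · simp [pvALoop, h]
    · rw [show pvALoop t (line :: rest) 1 none deps =
          pvALoop t rest 1 (some (PySem.Str.find line ":"))
            (deps ++ [pvLineEntry (PySem.Str.find line ":") line]) by
        simp [pvALoop, h, pvLineEntry]]
      rw [pvALoop_state1_some]
      simp [h]

-- B's window "tail[:tail.index('')] if '' in tail else tail" is takeWhile (· ≠ "")
theorem pvIndexTake_eq_takeWhile (xs : List String) :
    (match PySem.List.index? xs "" with
      | some k => xs.take k
      | none => xs) = xs.takeWhile (fun ln => !(ln == "")) := by
  induction xs with
  | nil => simp [PySem.List.index?]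
  | cons x xs ih =>
    by_cases h : x = ""
    · subst h
      rw [PySem.List.index?_cons_self]
      simp
    · rw [PySem.List.index?_cons_of_ne xs h]
      cases hx : PySem.List.index? xs "" with
      | none =>
        rw [hx] at ih
        simp [h, ← ih]
      | some k =>
        rw [hx] at ih
        simp [h, ← ih]

-- ===== VERDICT (by name: the statement is the Claim_ definition above) =====
theorem parse_task_tree_output_spec : Claim_equal_parse_task_tree_output := by
  intro task_name output _ _
  unfold Spec_parse_task_tree_output parse_task_tree_output parse_task_tree_output_alt
  rw [pvALoop_state0]
  cases h : ((PySem.Str.split? output "\n").getD []).findIdx?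
      (fun ln => PySem.Str.startswith ln task_name) with
  | none => simp only [h]
  | some start =>
    simp only [h]
    rw [show ((start : Int) + 1) = ((start + 1 : Nat) : Int) by push_cast; ring,
      PySem.List.slice_from_natCast, pvIndexTake_eq_takeWhile, pvALoop_state1_none]
    cases hb : (((PySem.Str.split? output "\n").getD []).drop (start + 1)).takeWhile
        (fun ln => !(ln == "")) with
    | nil => simp
    | cons b0 bs => simp [pvLineEntry]
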